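-- pv_equiv track=rewrite | github.com/wilmurillo-ai/Design-Assistant | .skills/openclaw-skills/skills/skz7s/kre-video-translator/scripts/translate.py | _parse_language_list
-- ===== SOURCE A (Python) =====
-- def _parse_language_list(values: list[str] | None) -> list[str]:
--     if not values:
--         return []
--     result: list[str] = []
--     for raw in values:
--         text = str(raw or "").strip()
--         if not text:
--             continue
--         for part in text.replace("|", ",").split(","):
--             code = str(part or "").strip().lower()
--             if code and code not in result:
--                 result.append(code)
--     return result
-- ===== SOURCE B (Python) =====
-- def _parse_language_list(values: list[str] | None) -> list[str]:
--     def clean(raw):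
--         return [c for p in str(raw or "").strip().replace("|", ",").split(",")
--                 if (c := str(p or "").strip().lower())]
--
--     # build the answer back-to-front: walk the entries in reverse, prepending each
--     # entry's deduped codes and dropping later occurrences from the result so far
--     result: list[str] = []
--     for raw in reversed(values or []):
--         head = list(dict.fromkeys(clean(raw)))
--         result = head + [c for c in result if c not in head]
--     return result
-- ===== Notes on version B (the rewrite author's own statement) =====
-- stated objective: alternative
-- what changed: Replaced A's single forward accumulator loop (membership test against the growing result) by a structural recursion on the list that builds the answer back-to-front: dedup the head entry's codes, recurse on the tail, and filter the recursive result against the head's codes.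
import Mathlib
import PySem

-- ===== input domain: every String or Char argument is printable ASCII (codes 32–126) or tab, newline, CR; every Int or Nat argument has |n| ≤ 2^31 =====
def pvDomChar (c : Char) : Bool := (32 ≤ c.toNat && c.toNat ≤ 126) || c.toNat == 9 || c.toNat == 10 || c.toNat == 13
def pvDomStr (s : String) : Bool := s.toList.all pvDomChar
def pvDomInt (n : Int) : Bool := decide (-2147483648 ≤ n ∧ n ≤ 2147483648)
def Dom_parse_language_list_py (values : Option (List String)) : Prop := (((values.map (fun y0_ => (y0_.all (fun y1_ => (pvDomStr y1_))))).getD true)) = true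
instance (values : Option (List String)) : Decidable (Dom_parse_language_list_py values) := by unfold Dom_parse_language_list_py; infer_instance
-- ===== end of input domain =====

-- B replaces A's forward accumulator loop by a structural recursion that builds the result
-- back-to-front (head entry's deduped codes, then the recursive tail result filtered against
-- them); same return value on every input (A is total).

-- s.split(",")  — exact: the separator "," is nonempty, so Python's split never raises here
def pySplitComma (s : String) : List String := (PySem.Str.split? s ",").getD []

-- ===== PORT A =====
def parse_language_list_py (values : Option (List String)) : List String :=
  match values with
  | none => []                                  -- 'if not values' (None)
  | some vs =>
    if vs = [] then []                          -- 'if not values' (empty list)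
    else
      vs.foldl (fun result raw =>
        let text := PySem.Str.strip raw         -- str(raw or "").strip(): raw is a str, so this is raw.strip()
        if text = "" then result                -- 'if not text: continue'
        else
          (pySplitComma (PySem.Str.replace text "|" ",")).foldl
            (fun result part =>
              let code := PySem.Str.lower (PySem.Str.strip part)  -- str(part or "").strip().lower()
              if code ≠ "" ∧ code ∉ result then result ++ [code] else result)
            result) []

-- ===== PORT B =====
-- clean(raw): the cleaned codes one raw entry contributes
def pvClean (raw : String) : List String :=
  ((pySplitComma (PySem.Str.replace (PySem.Str.strip raw) "|" ",")).map
      (fun p => PySem.Str.lower (PySem.Str.strip p))).filter (fun c => c != "")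

-- B's loop: walk the entries in reverse, prepending each entry's deduped codes and
-- dropping later occurrences from the result so far
def parse_language_list_py_alt (values : Option (List String)) : List String :=
  ((values.getD []).reverse).foldl
    (fun result raw =>
      let head := PySem.List.dedup (pvClean raw)   -- list(dict.fromkeys(clean(raw)))
      head ++ result.filter (fun c => !head.contains c))
    []

-- ===== PRECONDITION & SPEC =====
def Spec_parse_language_list_py (values : Option (List String)) (out : List String) : Prop := out = parse_language_list_py_alt values
instance (values : Option (List String)) (out : List String) : Decidable (Spec_parse_language_list_py values out) := by unfold Spec_parse_language_list_py; infer_instance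

-- ===== CLAIM (what is proved, stated in full; the proofs are below) =====
def Claim_equal_parse_language_list_py : Prop := ∀ (values : Option (List String)), Dom_parse_language_list_py values → Spec_parse_language_list_py values (parse_language_list_py values)

-- ===== LEMMAS AND PROOFS =====

-- B's reversed loop, as the structural recursion it computes
def pvGo : List String → List String
  | [] => []
  | raw :: rest =>
    let head := PySem.List.dedup (pvClean raw)
    head ++ (pvGo rest).filter (fun c => !head.contains c)

-- B's reversed foldl = pvGo
theorem revFold_eq_go (vs : List String) :
    (vs.reverse).foldl
      (fun result raw =>
        let head := PySem.List.dedup (pvClean raw)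
        head ++ result.filter (fun c => !head.contains c))
      [] = pvGo vs := by
  induction vs with
  | nil => rfl
  | cons raw rest ih =>
    rw [List.reverse_cons, List.foldl_append, ih]
    rfl

-- A's inner loop over the comma parts = Set.update with that entry's cleaned codes
theorem inner_fold (f : String → String) (parts : List String) (acc : List String) :
    parts.foldl (fun result part =>
        let code := f part
        if code ≠ "" ∧ code ∉ result then result ++ [code] else result) acc
    = PySem.Set.update acc ((parts.map f).filter (fun c => c != "")) := by
  induction parts generalizing acc with
  | nil => rfl
  | cons p ps ih =>
    simp only [List.foldl_cons, List.map_cons, List.filter_cons]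
    by_cases hc : f p = ""
    · simp [hc, ih]
    · by_cases hm : f p ∈ acc
      · simp [hc, hm, ih, PySem.Set.update_cons, PySem.Set.add]
      · simp [hc, hm, ih, PySem.Set.update_cons, PySem.Set.add]

-- an entry whose stripped text is empty contributes no codes
theorem pvClean_of_strip_empty (raw : String) (h : PySem.Str.strip raw = "") :
    pvClean raw = [] := by
  unfold pvClean
  rw [h]
  decide

-- A's loop body, as a function, = Set.update with the entry's cleaned codes
theorem step_eq :
    (fun (result : List String) raw =>
        let text := PySem.Str.strip raw
        if text = "" then result
        else
          (pySplitComma (PySem.Str.replace text "|" ",")).foldl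
            (fun result part =>
              let code := PySem.Str.lower (PySem.Str.strip part)
              if code ≠ "" ∧ code ∉ result then result ++ [code] else result)
            result)
    = (fun acc raw => PySem.Set.update acc (pvClean raw)) := by
  funext acc raw
  by_cases h : PySem.Str.strip raw = ""
  · simp [h, pvClean_of_strip_empty raw h, PySem.Set.update_nil]
  · simp only [if_neg h]
    rw [inner_fold (fun part => PySem.Str.lower (PySem.Str.strip part))]
    rfl

-- folding Set.update over the entries = acc, then B's recursive result minus what acc has
theorem updFold (vs : List String) (acc : List String) :
    vs.foldl (fun a r => PySem.Set.update a (pvClean r)) acc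
    = acc ++ (pvGo vs).filter (fun c => !acc.contains c) := by
  induction vs generalizing acc with
  | nil => simp [pvGo]
  | cons raw rest ih =>
    rw [List.foldl_cons, ih]
    rw [PySem.Set.update_eq_append_filter]
    simp only [pvGo, PySem.List.dedup_eq_ofList, List.filter_append, List.append_assoc]
    congr 2
    rw [List.filter_filter]
    apply List.filter_congr
    intro x _
    by_cases hx : x ∈ acc <;>
      by_cases hh : x ∈ PySem.Set.ofList (pvClean raw) <;>
        simp [hx, hh, PySem.Set.contains, List.mem_append, List.mem_filter]

-- ===== VERDICT (by name: the statement is the Claim_ definition above) =====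
theorem parse_language_list_py_spec : Claim_equal_parse_language_list_py := by
  intro values _
  unfold Spec_parse_language_list_py parse_language_list_py parse_language_list_py_alt
  cases values with
  | none => rfl
  | some vs =>
    simp only [Option.getD_some]
    rw [revFold_eq_go]
    by_cases hv : vs = []
    · simp [hv, pvGo]
    · rw [if_neg hv, step_eq, updFold]
      simp
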